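-- pv_equiv track=rewrite | github.com/Yizhou-Jack/Leetcode-Python | Python/Leetcode/5890.py | minimumMoves
-- ===== SOURCE A (Python) =====
-- def minimumMoves(s: str) -> int:
--     res = 0
--     strList = list(s)
--     n = len(strList)
--     for i in range(n):
--         if strList[i] == 'X':
--             res += 1
--             strList[i] == 'O'
--             if i+1 < n: strList[i+1] = 'O'
--             if i+2 < n: strList[i+2] = 'O'
--     return res
-- ===== SOURCE B (Python) =====
-- def minimumMoves(s: str) -> int:
--     res = 0
--     i = 0
--     n = len(s)
--     while i < n:
--         if s[i] == 'X':
--             res += 1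
--             i += 3
--         else:
--             i += 1
--     return res
-- ===== Notes on version B (the rewrite author's own statement) =====
-- stated objective: simpler
-- what changed: Replaces the copy-to-list, visit-every-index-and-mutate loop with a direct index-pointer scan over the string that jumps 3 ahead on each 'X' and keeps no auxiliary list.
import Mathlib
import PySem

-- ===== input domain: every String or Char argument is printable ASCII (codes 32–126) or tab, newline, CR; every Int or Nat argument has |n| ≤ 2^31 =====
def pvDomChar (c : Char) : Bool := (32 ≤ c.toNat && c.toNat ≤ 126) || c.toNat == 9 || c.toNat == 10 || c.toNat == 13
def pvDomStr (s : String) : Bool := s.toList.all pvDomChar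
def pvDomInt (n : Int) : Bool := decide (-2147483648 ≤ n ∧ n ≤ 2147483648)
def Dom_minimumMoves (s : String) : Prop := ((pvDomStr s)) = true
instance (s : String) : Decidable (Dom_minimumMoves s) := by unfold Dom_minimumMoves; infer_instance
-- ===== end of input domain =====

-- B replaces A's copy-to-list, visit-every-index-and-mutate loop by an index-pointer scan of the
-- string that jumps 3 ahead on each 'X' and keeps no auxiliary list (objective: simpler).

-- ===== PORT A =====
-- one iteration of A's for-loop body; `n` is len(strList), the state is (res, strList).
-- The source line `strList[i] == 'O'` is a comparison whose value is discarded (not an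
-- assignment), so it contributes nothing and has no counterpart here.
def aStep (n : Nat) (st : Int × List Char) (i : Nat) : Int × List Char :=
  if st.2.getD i ' ' = 'X' then
    let l1 := if i + 1 < n then st.2.set (i + 1) 'O' else st.2
    let l2 := if i + 2 < n then l1.set (i + 2) 'O' else l1
    (st.1 + 1, l2)
  else st

def minimumMoves (s : String) : Int :=
  let strList := s.toList
  let n := strList.length
  -- `for i in range(n)` over the mutable state (res, strList); indices 0..n-1 are in range
  ((List.range n).foldl (aStep n) ((0 : Int), strList)).1

-- ===== PORT B =====
-- the `while i < n` loop of Source B: res accumulator, pointer jumps 3 on 'X', else 1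
def altLoop (l : List Char) (n i : Nat) (res : Int) : Int :=
  if i < n then
    if l.getD i ' ' = 'X' then altLoop l n (i + 3) (res + 1)
    else altLoop l n (i + 1) res
  else res
termination_by n - i

def minimumMoves_alt (s : String) : Int :=
  altLoop s.toList s.toList.length 0 0

-- ===== PRECONDITION & SPEC =====
def Spec_minimumMoves (s : String) (out : Int) : Prop := out = minimumMoves_alt s
instance (s : String) (out : Int) : Decidable (Spec_minimumMoves s out) := by unfold Spec_minimumMoves; infer_instance

-- ===== CLAIM (what is proved, stated in full; the proofs are below) =====
def Claim_equal_minimumMoves : Prop := ∀ (s : String), Dom_minimumMoves s → Spec_minimumMoves s (minimumMoves s)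

-- ===== LEMMAS AND PROOFS =====

-- proof-only: A's loop from index i with fuel k, the mutations made explicit
def cntA (lst : List Char) (i : Nat) : Nat → Int
  | 0 => 0
  | k + 1 =>
    if lst.getD i ' ' = 'X' then 1 + cntA ((lst.set (i + 1) 'O').set (i + 2) 'O') (i + 1) k
    else cntA lst (i + 1) k

-- proof-only: B's scan from index i with fuel k (fuel = remaining cells)
def cntB (lst : List Char) (i : Nat) : Nat → Int
  | 0 => 0
  | k + 1 =>
    if lst.getD i ' ' = 'X' then 1 + cntB lst (i + 3) (k - 2)
    else cntB lst (i + 1) k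

theorem getD_set (l : List Char) (m j : Nat) (c d : Char) :
    (l.set m c).getD j d = if m = j ∧ m < l.length then c else l.getD j d := by
  simp only [List.getD, List.getElem?_set]
  split_ifs with h1 h2 h3 <;> simp_all <;> omega

theorem foldA (n : Nat) : ∀ (k i : Nat) (res : Int) (lst : List Char), lst.length = n →
    ((List.range' i k).foldl (aStep n) (res, lst)).1 = res + cntA lst i k := by
  intro k
  induction k with
  | zero => intro i res lst _; simp [cntA]
  | succ k ih =>
    intro i res lst hlen
    rw [List.range'_succ, List.foldl_cons]
    by_cases hx : lst.getD i ' ' = 'X'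
    · have hstep : aStep n (res, lst) i = (res + 1, (lst.set (i + 1) 'O').set (i + 2) 'O') := by
        have e1 : (if i + 1 < n then lst.set (i + 1) 'O' else lst) = lst.set (i + 1) 'O' := by
          split_ifs with h1
          · rfl
          · exact (List.set_eq_of_length_le (by omega)).symm
        have e2 : (if i + 2 < n then (lst.set (i + 1) 'O').set (i + 2) 'O'
              else lst.set (i + 1) 'O') = (lst.set (i + 1) 'O').set (i + 2) 'O' := by
          split_ifs with h2
          · rfl
          · exact (List.set_eq_of_length_le (by rw [List.length_set]; omega)).symm
        simp only [aStep]
        rw [if_pos hx, e1, e2]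
      rw [hstep, ih _ _ _ (by simp [hlen])]
      simp only [cntA]
      rw [if_pos hx]
      ring
    · have hstep : aStep n (res, lst) i = (res, lst) := by
        simp only [aStep]
        rw [if_neg hx]
      rw [hstep, ih _ _ _ hlen]
      simp only [cntA]
      rw [if_neg hx]

theorem cntA_congr : ∀ (k i : Nat) (l1 l2 : List Char), l1.length = l2.length →
    (∀ j, i ≤ j → l1.getD j ' ' = l2.getD j ' ') → cntA l1 i k = cntA l2 i k := by
  intro k
  induction k with
  | zero => intro _ _ _ _ _; simp [cntA]
  | succ k ih =>
    intro i l1 l2 hlen hagree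
    have hi : l1.getD i ' ' = l2.getD i ' ' := hagree i le_rfl
    simp only [cntA]
    rw [← hi]
    by_cases hx : l1.getD i ' ' = 'X'
    · rw [if_pos hx, if_pos hx]
      congr 1
      apply ih
      · simp [hlen]
      · intro j hj
        rw [getD_set, getD_set, getD_set, getD_set]
        simp only [List.length_set, hlen]
        split_ifs with h1 h2
        · rfl
        · rfl
        · exact hagree j (by omega)
    · rw [if_neg hx, if_neg hx]
      exact ih (i + 1) l1 l2 hlen (fun j hj => hagree j (by omega))

theorem set_getD_ne_X (lst : List Char) (i m : Nat) (h : m = i + 1 ∨ m = i + 2) :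
    ¬ ((lst.set (i + 1) 'O').set (i + 2) 'O').getD m ' ' = 'X' := by
  rw [getD_set, getD_set]
  simp only [List.length_set]
  split_ifs with h1 h2
  · decide
  · decide
  · rcases h with rfl | rfl
    · have hout : ¬ i + 1 < lst.length := fun hl => h2 ⟨rfl, hl⟩
      rw [List.getD_eq_default _ _ (by omega)]
      decide
    · have hout : ¬ i + 2 < lst.length := fun hl => h1 ⟨rfl, hl⟩
      rw [List.getD_eq_default _ _ (by omega)]
      decide

theorem cntA_eq_cntB : ∀ (k i : Nat) (lst : List Char), cntA lst i k = cntB lst i k := by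
  intro k
  induction k using Nat.strong_induction_on with
  | _ k ih =>
    intro i lst
    match k with
    | 0 => simp [cntA, cntB]
    | k + 1 =>
      simp only [cntA, cntB]
      by_cases hx : lst.getD i ' ' = 'X'
      · rw [if_pos hx, if_pos hx]
        congr 1
        have h1 := set_getD_ne_X lst i (i + 1) (Or.inl rfl)
        have h2 := set_getD_ne_X lst i (i + 2) (Or.inr rfl)
        match k with
        | 0 => simp [cntA, cntB]
        | 1 =>
          simp only [cntA]
          rw [if_neg h1, show (1:Nat) - 2 = 0 from by norm_num]
          simp [cntB]
        | k + 2 =>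
          simp only [cntA]
          rw [if_neg h1, show i + 1 + 1 = i + 2 from by omega]
          rw [if_neg h2, show i + 2 + 1 = i + 3 from by omega,
              show k + 2 - 2 = k from by omega]
          rw [cntA_congr k (i + 3) _ lst (by simp) ?_]
          · exact ih k (by omega) (i + 3) lst
          · intro j hj
            rw [getD_set, getD_set]
            rw [if_neg (by rintro ⟨hz, -⟩; omega), if_neg (by rintro ⟨hz, -⟩; omega)]
      · rw [if_neg hx, if_neg hx]
        exact ih k (by omega) (i + 1) lst

theorem altLoop_eq_cntB (l : List Char) (n : Nat) :
    ∀ (k i : Nat), n - i ≤ k → ∀ (res : Int), altLoop l n i res = res + cntB l i (n - i) := by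
  intro k
  induction k with
  | zero =>
    intro i hk res
    have hi : ¬ i < n := by omega
    have h0 : n - i = 0 := by omega
    rw [altLoop, if_neg hi, h0]
    simp [cntB]
  | succ k ih =>
    intro i hk res
    by_cases hi : i < n
    · have hni : n - i = (n - i - 1) + 1 := by omega
      rw [altLoop, if_pos hi, hni]
      simp only [cntB]
      by_cases hx : l.getD i ' ' = 'X'
      · rw [if_pos hx, if_pos hx, ih (i + 3) (by omega) (res + 1),
            show n - i - 1 - 2 = n - (i + 3) from by omega]
        ring
      · rw [if_neg hx, if_neg hx, ih (i + 1) (by omega) res,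
            show n - i - 1 = n - (i + 1) from by omega]
    · have h0 : n - i = 0 := by omega
      rw [altLoop, if_neg hi, h0]
      simp [cntB]

-- ===== VERDICT (by name: the statement is the Claim_ definition above) =====
theorem minimumMoves_spec : Claim_equal_minimumMoves := by
  intro s _
  unfold Spec_minimumMoves
  simp only [minimumMoves, minimumMoves_alt]
  rw [List.range_eq_range', foldA s.toList.length s.toList.length 0 0 s.toList rfl,
      cntA_eq_cntB,
      altLoop_eq_cntB s.toList s.toList.length s.toList.length 0 (by omega) 0,
      Nat.sub_zero]
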